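-- pv_equiv track=rewrite | github.com/johnserra/bd-automation-suite | modules/pipeline_reporter/reporter.py | format_pipeline_summary_table
-- ===== SOURCE A (Python) =====
-- PIPELINE_STAGES = [
--     "Research", "Qualified", "Outreach", "Engaged",
--     "Negotiating", "Proposal", "Samples Sent", "Won", "Lost", "Not Now",
-- ]
--
-- def format_pipeline_summary_table(summary: dict[str, dict[str, int]]) -> str:
--     """Format pipeline summary as a Markdown table.
--
--     Columns: Stage | Stream1 | Stream2 | ... | Total
--     """
--     if not summary:
--         return "_No leads in pipeline._\n"
--
--     streams = sorted(summary.keys())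
--     # Collect all stages present, ordered by PIPELINE_STAGES
--     all_stages = set()
--     for stage_counts in summary.values():
--         all_stages.update(stage_counts.keys())
--     ordered_stages = [s for s in PIPELINE_STAGES if s in all_stages]
--     # Add any stages not in our ordered list
--     for s in sorted(all_stages):
--         if s not in ordered_stages:
--             ordered_stages.append(s)
--
--     # Header
--     header = "| Stage | " + " | ".join(streams) + " | Total |"
--     separator = "|---|" + "|".join(["---:" for _ in streams]) + "|---:|"
--
--     rows = []
--     stream_totals = {s: 0 for s in streams}
--     grand_total = 0
--     for stage in ordered_stages:
--         parts = [f"| {stage}"]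
--         row_total = 0
--         for stream in streams:
--             count = summary[stream].get(stage, 0)
--             parts.append(str(count))
--             stream_totals[stream] += count
--             row_total += count
--         parts.append(str(row_total))
--         grand_total += row_total
--         rows.append(" | ".join(parts) + " |")
--
--     # Totals row
--     total_parts = ["| **Total**"]
--     for stream in streams:
--         total_parts.append(f"**{stream_totals[stream]}**")
--     total_parts.append(f"**{grand_total}**")
--     rows.append(" | ".join(total_parts) + " |")
--
--     return "\n".join([header, separator] + rows) + "\n"
-- ===== SOURCE B (Python) =====
-- PIPELINE_STAGES = [
--     "Research", "Qualified", "Outreach", "Engaged",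
--     "Negotiating", "Proposal", "Samples Sent", "Won", "Lost", "Not Now",
-- ]
--
-- def format_pipeline_summary_table(summary: dict[str, dict[str, int]]) -> str:
--     """Format pipeline summary as a Markdown table (grid-then-render decomposition)."""
--     if not summary:
--         return "_No leads in pipeline._\n"
--
--     streams = sorted(summary.keys())
--     all_stages = set()
--     for stage_counts in summary.values():
--         all_stages.update(stage_counts.keys())
--     ordered_stages = [s for s in PIPELINE_STAGES if s in all_stages]
--     for s in sorted(all_stages):
--         if s not in ordered_stages:
--             ordered_stages.append(s)
--
--     # Numeric grid: one row of counts per stage, one column per stream.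
--     grid = [[summary[stream].get(stage, 0) for stream in streams]
--             for stage in ordered_stages]
--     row_totals = [sum(row) for row in grid]
--     col_totals = [sum(row[j] for row in grid) for j in range(len(streams))]
--     grand_total = sum(row_totals)
--
--     # Uniform rendering pass.
--     lines = ["| Stage | " + " | ".join(streams) + " | Total |",
--              "|---|" + "---:|" * len(streams) + "---:|"]
--     for stage, row, row_total in zip(ordered_stages, grid, row_totals):
--         cells = [stage] + [str(c) for c in row] + [str(row_total)]
--         lines.append("| " + " | ".join(cells) + " |")
--     totals = ["**Total**"] + [f"**{t}**" for t in col_totals] + [f"**{grand_total}**"]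
--     lines.append("| " + " | ".join(totals) + " |")
--     return "\n".join(lines) + "\n"
-- ===== Notes on version B (the rewrite author's own statement) =====
-- stated objective: alternative
-- what changed: B replaces A's single render-while-accumulating loop (string parts, a running stream_totals dict and grand total updated inside the row loop) with a table-then-aggregate decomposition: it first builds a numeric grid of counts, then derives row totals, column totals and the grand total from the grid, and renders all lines in a separate uniform pass; Pre_ only excludes association lists with duplicate stream keys, which cannot arise from a Python dict.
import Mathlib
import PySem

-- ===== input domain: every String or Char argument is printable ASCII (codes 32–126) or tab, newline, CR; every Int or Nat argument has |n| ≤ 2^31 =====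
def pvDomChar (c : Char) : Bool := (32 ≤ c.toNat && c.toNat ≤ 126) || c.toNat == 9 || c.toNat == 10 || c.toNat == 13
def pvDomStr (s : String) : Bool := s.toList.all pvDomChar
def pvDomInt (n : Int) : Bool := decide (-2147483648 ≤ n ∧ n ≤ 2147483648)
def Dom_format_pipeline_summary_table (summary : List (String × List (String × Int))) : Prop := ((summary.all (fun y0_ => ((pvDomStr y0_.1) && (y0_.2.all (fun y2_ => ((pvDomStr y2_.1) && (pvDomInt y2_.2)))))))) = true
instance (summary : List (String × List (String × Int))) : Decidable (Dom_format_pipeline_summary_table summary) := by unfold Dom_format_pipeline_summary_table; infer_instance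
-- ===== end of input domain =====

-- B re-decomposes A's single accumulate-while-rendering loop into a numeric grid
-- (rows per stage), separate row/column/grand totals over the grid, and a uniform
-- rendering pass; objective: alternative decomposition, same asymptotic cost.

-- ===== PORT A =====
-- Shared transliteration of lines both Pythons have verbatim: PIPELINE_STAGES,
-- streams = sorted(summary.keys()), the all_stages set, ordered_stages, and the
-- cell access summary[stream].get(stage, 0).
def PIPELINE_STAGES : List String :=
  ["Research", "Qualified", "Outreach", "Engaged",
   "Negotiating", "Proposal", "Samples Sent", "Won", "Lost", "Not Now"]

def pvStreams (summary : List (String × List (String × Int))) : List String :=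
  PySem.List.sorted (summary.map Prod.fst) (fun x => x) false

def pvOrderedStages (summary : List (String × List (String × Int))) : List String :=
  let all_stages : PySem.Set String :=
    (summary.map Prod.snd).foldl (fun acc sc => PySem.Set.update acc (sc.map Prod.fst)) PySem.Set.empty
  let ordered0 := PIPELINE_STAGES.filter (fun s => PySem.Set.contains all_stages s)
  (PySem.List.sorted all_stages (fun x => x) false).foldl
    (fun acc s => if acc.contains s then acc else acc ++ [s]) ordered0

def pvCount (summary : List (String × List (String × Int))) (stream stage : String) : Int :=
  PySem.Dict.getD (PySem.Dict.mk (PySem.Dict.getD (PySem.Dict.mk summary) stream [])) stage 0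

def format_pipeline_summary_table (summary : List (String × List (String × Int))) : String :=
  if summary.isEmpty then "_No leads in pipeline._\n" else
  let streams := pvStreams summary
  let ordered_stages := pvOrderedStages summary
  let header := "| Stage | " ++ PySem.Str.join " | " streams ++ " | Total |"
  let separator := "|---|" ++ PySem.Str.join "|" (streams.map (fun _ => "---:")) ++ "|---:|"
  let st0 : PySem.Dict String Int := streams.foldl (fun d s => d.insert s 0) PySem.Dict.empty
  let res :=
    ordered_stages.foldl
      (fun (acc : List String × PySem.Dict String Int × Int) stage =>
        let inner :=
          streams.foldl
            (fun (q : List String × Int × PySem.Dict String Int) stream =>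
              let count := pvCount summary stream stage
              (q.1 ++ [PySem.Int.toStr count], q.2.1 + count, q.2.2.modify stream 0 (· + count)))
            (["| " ++ stage], 0, acc.2.1)
        (acc.1 ++ [PySem.Str.join " | " (inner.1 ++ [PySem.Int.toStr inner.2.1]) ++ " |"],
         inner.2.2, acc.2.2 + inner.2.1))
      ([], st0, 0)
  let total_parts :=
    streams.foldl
      (fun tp s => tp ++ ["**" ++ PySem.Int.toStr (PySem.Dict.getD res.2.1 s 0) ++ "**"])
      ["| **Total**"]
  PySem.Str.join "\n"
    ([header, separator] ++ res.1 ++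
     [PySem.Str.join " | " (total_parts ++ ["**" ++ PySem.Int.toStr res.2.2 ++ "**"]) ++ " |"]) ++ "\n"

-- ===== PORT B =====
def format_pipeline_summary_table_alt (summary : List (String × List (String × Int))) : String :=
  if summary.isEmpty then "_No leads in pipeline._\n" else
  let streams := pvStreams summary
  let ordered_stages := pvOrderedStages summary
  let grid := ordered_stages.map (fun stage => streams.map (fun stream => pvCount summary stream stage))
  let row_totals := grid.map List.sum
  let col_totals :=
    (PySem.List.pyRange 0 (streams.length : Int) 1).map
      (fun j => (grid.map (fun row => PySem.List.pyGetD row j 0)).sum)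
  let grand_total := row_totals.sum
  let header := "| Stage | " ++ PySem.Str.join " | " streams ++ " | Total |"
  let sep := "|---|" ++ PySem.Str.join "" (List.replicate streams.length "---:|") ++ "---:|"
  let body :=
    (ordered_stages.zip (grid.zip row_totals)).map
      (fun z => "| " ++ PySem.Str.join " | " (z.1 :: z.2.1.map PySem.Int.toStr ++ [PySem.Int.toStr z.2.2]) ++ " |")
  let totals :=
    "| " ++ PySem.Str.join " | "
      ("**Total**" :: col_totals.map (fun t => "**" ++ PySem.Int.toStr t ++ "**") ++
       ["**" ++ PySem.Int.toStr grand_total ++ "**"]) ++ " |"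
  PySem.Str.join "\n" ([header, sep] ++ body ++ [totals]) ++ "\n"

-- ===== PRECONDITION & SPEC =====
-- Pre_ excludes association lists whose outer (stream) keys repeat: a Python dict cannot
-- have duplicate keys, so such lists do not represent any input A runs on, and on them the
-- two assoc-list readings legitimately disagree.
def Pre_format_pipeline_summary_table (summary : List (String × List (String × Int))) : Prop :=
  (summary.map Prod.fst).Nodup
instance (summary : List (String × List (String × Int))) : Decidable (Pre_format_pipeline_summary_table summary) := by unfold Pre_format_pipeline_summary_table; infer_instance

def pvWitness_format_pipeline_summary_table : (List (String × List (String × Int))) :=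
  [("email", [("Research", 2), ("Won", 1)]), ("calls", [("Won", 3)])]

def Spec_format_pipeline_summary_table (summary : List (String × List (String × Int))) (out : String) : Prop := out = format_pipeline_summary_table_alt summary
instance (summary : List (String × List (String × Int))) (out : String) : Decidable (Spec_format_pipeline_summary_table summary out) := by unfold Spec_format_pipeline_summary_table; infer_instance

-- ===== CLAIM (what is proved, stated in full; the proofs are below) =====
def Claim_equal_format_pipeline_summary_table : Prop := ∀ (summary : List (String × List (String × Int))), Dom_format_pipeline_summary_table summary → Pre_format_pipeline_summary_table summary → Spec_format_pipeline_summary_table summary (format_pipeline_summary_table summary)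

-- ===== LEMMAS AND PROOFS =====

lemma ic_cons (sep x : List Char) (l : List (List Char)) :
    List.intercalate sep (x :: l) = x ++ (if l = [] then [] else sep ++ List.intercalate sep l) := by
  cases l <;> simp [List.intercalate, List.intersperse]

lemma ic_nil_sep (l : List (List Char)) : List.intercalate [] l = l.flatten := by
  induction l with
  | nil => simp [List.intercalate]
  | cons x t ih => rw [ic_cons]; cases t <;> simp_all

lemma join_prefix (sep p x : String) (l : List String) :
    PySem.Str.join sep ((p ++ x) :: l) = p ++ PySem.Str.join sep (x :: l) := by
  apply String.toList_inj.mp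
  simp only [PySem.Str.join, PySem.Chars.join, List.map_cons, String.toList_append,
    String.toList_ofList]
  rw [ic_cons, ic_cons]
  simp [List.append_assoc]

lemma repSep (n : Nat) :
    List.intercalate "|".toList (List.replicate (n+1) "---:".toList) =
      (List.replicate n "---:|".toList).flatten ++ "---:".toList := by
  induction n with
  | zero => simp [ic_cons]
  | succ m ih =>
      rw [List.replicate_succ, ic_cons]
      simp only [List.replicate_succ] at *
      simp_all

lemma sep_eq (streams : List String) (h : streams ≠ []) :
    "|---|" ++ PySem.Str.join "|" (streams.map (fun _ => "---:")) ++ "|---:|" =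
    "|---|" ++ PySem.Str.join "" (List.replicate streams.length "---:|") ++ "---:|" := by
  obtain ⟨n, hn⟩ : ∃ n, streams.length = n + 1 := by
    cases streams with
    | nil => exact absurd rfl h
    | cons a t => exact ⟨t.length, rfl⟩
  apply String.toList_inj.mp
  simp only [PySem.Str.join, PySem.Chars.join, String.toList_append, String.toList_ofList,
    List.map_const', hn]
  rw [show (List.map String.toList (List.replicate (n+1) "---:")) = List.replicate (n+1) "---:".toList by simp,
      show (List.map String.toList (List.replicate (n+1) "---:|")) = List.replicate (n+1) "---:|".toList by simp]
  rw [repSep, show "".toList = ([] : List Char) from rfl, ic_nil_sep, List.replicate_succ',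
      List.flatten_append]
  simp [List.append_assoc]

lemma zip3_map {α β γ δ : Type} (l : List α) (f : α → β) (g : α → γ) (k : α × β × γ → δ) :
    ((l.zip ((l.map f).zip (l.map g))).map k) = l.map (fun x => k (x, f x, g x)) := by
  induction l with
  | nil => rfl
  | cons a t ih => simp [ih]


lemma getD_fold_modify_notmem (l : List String) (c : String → Int) (d : PySem.Dict String Int)
    (s : String) (h : s ∉ l) :
    (l.foldl (fun d t => d.modify t 0 (· + c t)) d).getD s 0 = d.getD s 0 := by
  induction l generalizing d with
  | nil => rfl
  | cons a t ih =>
      simp only [List.mem_cons, not_or] at h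
      simp only [List.foldl_cons]
      rw [ih _ h.2, PySem.Dict.getD_modify]
      simp [h.1]

lemma getD_fold_modify_mem (l : List String) (c : String → Int) (d : PySem.Dict String Int)
    (s : String) (hnd : l.Nodup) (hs : s ∈ l) :
    (l.foldl (fun d t => d.modify t 0 (· + c t)) d).getD s 0 = d.getD s 0 + c s := by
  induction l generalizing d with
  | nil => simp at hs
  | cons a t ih =>
      simp only [List.foldl_cons]
      rcases List.mem_cons.mp hs with h | h
      · subst h
        rw [getD_fold_modify_notmem _ _ _ _ (List.nodup_cons.mp hnd).1, PySem.Dict.getD_modify]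
        simp
      · rw [ih _ (List.nodup_cons.mp hnd).2 h, PySem.Dict.getD_modify]
        have : s ≠ a := fun e => (List.nodup_cons.mp hnd).1 (e ▸ h)
        simp [this]

lemma getD_outer (ordered streams : List String) (c : String → String → Int)
    (d : PySem.Dict String Int) (s : String) (hnd : streams.Nodup) (hs : s ∈ streams) :
    (ordered.foldl (fun d stage => streams.foldl (fun d t => d.modify t 0 (· + c t stage)) d) d).getD s 0
      = d.getD s 0 + (ordered.map (fun stage => c s stage)).sum := by
  induction ordered generalizing d with
  | nil => simp
  | cons stage rest ih =>
      simp only [List.foldl_cons, List.map_cons, List.sum_cons]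
      rw [ih _, getD_fold_modify_mem _ _ _ _ hnd hs]
      ring

lemma getD_insert0 (l : List String) (d : PySem.Dict String Int)
    (h : ∀ x, d.getD x 0 = (0:Int)) (s : String) :
    (l.foldl (fun d t => d.insert t 0) d).getD s 0 = 0 := by
  induction l generalizing d with
  | nil => exact h s
  | cons a t ih =>
      simp only [List.foldl_cons]
      refine ih _ (fun x => ?_)
      rw [PySem.Dict.getD_insert]
      split <;> simp [h]

lemma outerA (ordered streams : List String) (c : String → String → Int)
    (rows0 : List String) (st0 : PySem.Dict String Int) (g0 : Int) :
    ordered.foldl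
      (fun (acc : List String × PySem.Dict String Int × Int) stage =>
        let inner :=
          streams.foldl
            (fun (q : List String × Int × PySem.Dict String Int) stream =>
              let count := c stream stage
              (q.1 ++ [PySem.Int.toStr count], q.2.1 + count, q.2.2.modify stream 0 (· + count)))
            (["| " ++ stage], 0, acc.2.1)
        (acc.1 ++ [PySem.Str.join " | " (inner.1 ++ [PySem.Int.toStr inner.2.1]) ++ " |"],
         inner.2.2, acc.2.2 + inner.2.1))
      (rows0, st0, g0)
    = (rows0 ++ ordered.map (fun stage =>
         PySem.Str.join " | " ((["| " ++ stage] ++ streams.map (fun s => PySem.Int.toStr (c s stage)))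
            ++ [PySem.Int.toStr (streams.map (fun s => c s stage)).sum]) ++ " |"),
       ordered.foldl (fun d stage => streams.foldl (fun d s => d.modify s 0 (· + c s stage)) d) st0,
       g0 + (ordered.map (fun stage => (streams.map (fun s => c s stage)).sum)).sum) := by
  induction ordered generalizing rows0 st0 g0 with
  | nil => simp
  | cons stage rest ih =>
      simp only [List.foldl_cons, List.map_cons, List.sum_cons]
      rw [PySem.List.foldl_prod_mk
            (f := fun (acc : List String) (stream : String) => acc ++ [PySem.Int.toStr (c stream stage)])
            (g := fun (p : Int × PySem.Dict String Int) (stream : String) =>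
              (p.1 + c stream stage, p.2.modify stream 0 (· + c stream stage)))]
      rw [PySem.List.foldl_prod_mk
            (f := fun (a : Int) (stream : String) => a + c stream stage)
            (g := fun (d : PySem.Dict String Int) (stream : String) => d.modify stream 0 (· + c stream stage))]
      rw [PySem.List.foldl_append_singleton_eq_map, PySem.List.foldl_add]
      rw [ih]
      simp [List.append_assoc, add_assoc]

lemma colstr_eq (streams ordered : List String) (c : String → String → Int) :
    (List.range streams.length).map (fun j => "**" ++ PySem.Int.toStr
        ((ordered.map (fun stage => (streams.map (fun s => c s stage)).getD j 0)).sum) ++ "**")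
      = streams.map (fun s => "**" ++ PySem.Int.toStr ((ordered.map (fun stage => c s stage)).sum) ++ "**") := by
  apply List.ext_getElem
  · simp
  · intro i h1 h2
    simp only [List.length_map] at h2
    simp only [List.getElem_map, List.getElem_range]
    have hst : ∀ stage, (streams.map (fun s => c s stage)).getD i 0 = c streams[i] stage := by
      intro stage
      rw [List.getD_eq_getElem _ _ (by simpa using h2), List.getElem_map]
    rw [show (ordered.map (fun stage => (streams.map (fun s => c s stage)).getD i 0))
        = ordered.map (fun stage => c streams[i] stage) from
      List.map_congr_left (fun stage _ => hst stage)]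

-- ===== VERDICT (by name: the statement is the Claim_ definition above) =====
theorem format_pipeline_summary_table_spec : Claim_equal_format_pipeline_summary_table := by
  intro summary hdom hpre
  unfold Spec_format_pipeline_summary_table
  unfold format_pipeline_summary_table format_pipeline_summary_table_alt
  split_ifs with hemp
  · rfl
  have hsne : summary ≠ [] := by simpa [List.isEmpty_iff] using hemp
  have hne : pvStreams summary ≠ [] := by
    simp [pvStreams, PySem.List.sorted_eq_nil_iff, hsne]
  have hnd : (pvStreams summary).Nodup :=
    ((PySem.List.sorted_perm (summary.map Prod.fst) (fun x => x) false).nodup_iff).mpr hpre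
  simp only [outerA, zip3_map, List.map_map, PySem.List.pyRange_zero_natCast,
    PySem.List.pyGetD_natCast, Function.comp_def, List.nil_append]
  -- name the pieces
  set streams := pvStreams summary with hstr
  set ordered := pvOrderedStages summary with hord
  set c : String → String → Int := fun s stage => pvCount summary s stage with hc
  -- separator
  rw [sep_eq streams hne]
  -- body rows
  have hrows : (ordered.map (fun stage =>
        PySem.Str.join " | " ((["| " ++ stage] ++ streams.map (fun s => PySem.Int.toStr (c s stage)))
          ++ [PySem.Int.toStr (streams.map (fun s => c s stage)).sum]) ++ " |"))
      = ordered.map (fun stage =>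
        "| " ++ PySem.Str.join " | " (stage :: (streams.map (fun s => c s stage)).map PySem.Int.toStr
          ++ [PySem.Int.toStr (streams.map (fun s => c s stage)).sum]) ++ " |") := by
    refine List.map_congr_left (fun stage _ => ?_)
    rw [show (["| " ++ stage] ++ streams.map (fun s => PySem.Int.toStr (c s stage)))
          ++ [PySem.Int.toStr (streams.map (fun s => c s stage)).sum]
        = ("| " ++ stage) :: (streams.map (fun s => PySem.Int.toStr (c s stage))
          ++ [PySem.Int.toStr (streams.map (fun s => c s stage)).sum]) by simp]
    rw [join_prefix]
    simp [List.map_map, Function.comp_def]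
  rw [hrows]
  -- totals row
  have hst0 : ∀ x, (streams.foldl (fun d s => d.insert s 0) PySem.Dict.empty).getD x 0 = (0:Int) :=
    getD_insert0 streams PySem.Dict.empty (fun x => PySem.Dict.getD_empty x 0)
  have htotA : streams.foldl (fun tp s => tp ++ ["**" ++ PySem.Int.toStr
        ((ordered.foldl (fun d stage => streams.foldl (fun d t => d.modify t 0 (· + c t stage)) d)
          (streams.foldl (fun d s => d.insert s 0) PySem.Dict.empty)).getD s 0) ++ "**"]) ["| **Total**"]
      = ["| **Total**"] ++ streams.map (fun s => "**" ++ PySem.Int.toStr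
          ((ordered.map (fun stage => c s stage)).sum) ++ "**") := by
    rw [PySem.List.foldl_append_singleton_eq_map]
    refine congrArg _ (List.map_congr_left (fun s hs => ?_))
    rw [getD_outer ordered streams c _ s hnd hs, hst0, zero_add]
  rw [htotA, colstr_eq streams ordered c]
  rw [show ("| **Total**") = "| " ++ "**Total**" from by decide]
  rw [show ∀ (rest : List String), (["| " ++ "**Total**"] ++ streams.map (fun s => "**" ++ PySem.Int.toStr
        ((ordered.map (fun stage => c s stage)).sum) ++ "**")) ++ rest
      = ("| " ++ "**Total**") :: (streams.map (fun s => "**" ++ PySem.Int.toStr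
        ((ordered.map (fun stage => c s stage)).sum) ++ "**") ++ rest) from fun rest => by simp]
  rw [join_prefix]
  simp [List.map_map, Function.comp_def]
  rfl
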